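-- pv_equiv track=rewrite | github.com/prabhat24/Hashing | largest_subarray_with_contiguous_elements_(without duplicates).py | largest_subarrys_contiguous_elements_m3
-- ===== SOURCE A (Python) =====
-- def largest_subarrys_contiguous_elements_m3(arr, N):
-- 	# approach
-- 	# 1. generate all the subarrys
-- 	# 2. find min, max in subarray by iterating
-- 	# 3, ans = max - min + 1
-- 	# complexity = N^2 * N
-- 	global_max = 1
-- 	for i in range(0, N):
-- 		for j in range(i, N):
-- 			mina = 1<<31 - 1
-- 			maxa = -1 * (1<<32 - 1)
-- 			for k in range(i, j+1):
-- 				maxa = max(maxa, arr[k])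
-- 				mina = min(mina, arr[k])
-- 			if maxa - mina + 1 == j-i +1:
-- 				global_max = max(global_max, maxa-mina+1)
-- 	return global_max
-- ===== SOURCE B (Python) =====
-- def largest_subarrys_contiguous_elements_m3(arr, N):
--     # O(N^2): fix the left end i, extend the right end j maintaining running min/max,
--     # removing A's inner rescan of every subarray. The running min/max start from A's
--     # own sentinels (note: '1<<31 - 1' parses as 2**30 and '-1*(1<<32 - 1)' as -2**31)
--     # so B returns exactly A's value on every input, including values above 2**30.
--     best = 1
--     for i in range(N):
--         mn = 1 << 31 - 1
--         mx = -1 * (1 << 32 - 1)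
--         for j in range(i, N):
--             mn = min(mn, arr[j])
--             mx = max(mx, arr[j])
--             if mx - mn == j - i:
--                 best = max(best, j - i + 1)
--     return best
-- ===== Notes on version B (the rewrite author's own statement) =====
-- stated objective: faster
-- what changed: Replaced the inner O(N) min/max rescan of every subarray with running min/max maintained incrementally while extending the right end (started from A's own sentinel values, so A's behaviour is reproduced exactly everywhere), dropping a factor of N.
import Mathlib
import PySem

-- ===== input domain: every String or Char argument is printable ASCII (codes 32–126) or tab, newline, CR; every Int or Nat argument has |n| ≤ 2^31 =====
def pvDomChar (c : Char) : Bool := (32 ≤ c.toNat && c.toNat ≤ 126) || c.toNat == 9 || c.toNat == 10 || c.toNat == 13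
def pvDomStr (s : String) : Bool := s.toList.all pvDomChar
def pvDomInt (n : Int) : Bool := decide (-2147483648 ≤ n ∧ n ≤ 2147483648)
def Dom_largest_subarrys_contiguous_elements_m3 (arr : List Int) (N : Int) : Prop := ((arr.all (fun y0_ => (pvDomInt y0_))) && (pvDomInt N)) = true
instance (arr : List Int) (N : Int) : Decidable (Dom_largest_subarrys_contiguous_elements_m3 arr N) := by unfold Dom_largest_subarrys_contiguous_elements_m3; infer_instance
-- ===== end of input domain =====

-- B replaces A's per-subarray min/max rescan by running min/max maintained while extending
-- the right end (started from A's own sentinel initial values, so A is reproduced exactly).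

-- ===== PORT A =====
-- literal transliteration of A; arr[k] is in range whenever Pre_ holds (0 ≤ k < N ≤ len arr).
-- Python's 'mina = 1<<31 - 1' is 1<<30 = 1073741824 and 'maxa = -1 * (1<<32 - 1)' is -(1<<31) = -2147483648.
def largest_subarrys_contiguous_elements_m3 (arr : List Int) (N : Int) : Int :=
  (PySem.List.pyRange 0 N 1).foldl (fun global_max i =>
    (PySem.List.pyRange i N 1).foldl (fun global_max j =>
      let p := (PySem.List.pyRange i (j + 1) 1).foldl
        (fun (p : Int × Int) k =>
          (max p.1 (PySem.List.pyGetD arr k 0), min p.2 (PySem.List.pyGetD arr k 0)))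
        ((-2147483648 : Int), (1073741824 : Int))
      if p.1 - p.2 + 1 = j - i + 1 then max global_max (p.1 - p.2 + 1) else global_max)
      global_max) 1

-- ===== PORT B =====
-- literal transliteration of Source B: state (best, mn, mx), one pass of j per i.
def largest_subarrys_contiguous_elements_m3_alt (arr : List Int) (N : Int) : Int :=
  (PySem.List.pyRange 0 N 1).foldl (fun best i =>
    ((PySem.List.pyRange i N 1).foldl (fun (st : Int × Int × Int) j =>
      let mn := min st.2.1 (PySem.List.pyGetD arr j 0)
      let mx := max st.2.2 (PySem.List.pyGetD arr j 0)
      let best := if mx - mn = j - i then max st.1 (j - i + 1) else st.1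
      (best, mn, mx)) (best, (1073741824 : Int), (-2147483648 : Int))).1) 1

-- ===== PRECONDITION & SPEC =====
-- Pre_ excludes only the inputs where A raises IndexError: N > len(arr).
def Pre_largest_subarrys_contiguous_elements_m3 (arr : List Int) (N : Int) : Prop :=
  N ≤ (arr.length : Int)
instance (arr : List Int) (N : Int) : Decidable (Pre_largest_subarrys_contiguous_elements_m3 arr N) := by unfold Pre_largest_subarrys_contiguous_elements_m3; infer_instance
def pvWitness_largest_subarrys_contiguous_elements_m3 : List Int × Int := ([1, 3, 2], 3)
def Spec_largest_subarrys_contiguous_elements_m3 (arr : List Int) (N : Int) (out : Int) : Prop := out = largest_subarrys_contiguous_elements_m3_alt arr N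
instance (arr : List Int) (N : Int) (out : Int) : Decidable (Spec_largest_subarrys_contiguous_elements_m3 arr N out) := by unfold Spec_largest_subarrys_contiguous_elements_m3; infer_instance

-- ===== CLAIM (what is proved, stated in full; the proofs are below) =====
def Claim_equal_largest_subarrys_contiguous_elements_m3 : Prop := ∀ (arr : List Int) (N : Int), Dom_largest_subarrys_contiguous_elements_m3 arr N → Pre_largest_subarrys_contiguous_elements_m3 arr N → Spec_largest_subarrys_contiguous_elements_m3 arr N (largest_subarrys_contiguous_elements_m3 arr N)

-- ===== LEMMAS AND PROOFS =====

-- A's inner min/max fold over arr[i..s-1] from the sentinels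
def pvMM (arr : List Int) (i s : Int) : Int × Int :=
  (PySem.List.pyRange i s 1).foldl
    (fun (p : Int × Int) k =>
      (max p.1 (PySem.List.pyGetD arr k 0), min p.2 (PySem.List.pyGetD arr k 0)))
    ((-2147483648 : Int), (1073741824 : Int))

theorem pvMM_succ (arr : List Int) (i s : Int) (h : i ≤ s) :
    pvMM arr i (s + 1) =
      (max (pvMM arr i s).1 (PySem.List.pyGetD arr s 0),
       min (pvMM arr i s).2 (PySem.List.pyGetD arr s 0)) := by
  unfold pvMM
  rw [PySem.List.pyRange_one_succ_right h, List.foldl_append]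
  rfl

theorem pvMM_nil (arr : List Int) (i : Int) :
    pvMM arr i i = ((-2147483648 : Int), (1073741824 : Int)) := by
  unfold pvMM
  rw [PySem.List.pyRange_one_eq_nil (le_refl i)]
  rfl

-- core induction: from position s (i ≤ s), with B's state (acc2, mn, mx) matching A's
-- accumulator and A's recomputed min/max fold over arr[i..s-1], the inner loops agree
theorem pvInnerAux (arr : List Int) (N i : Int) :
    ∀ (n : ℕ) (s : Int), i ≤ s → (N - s).toNat = n →
    ∀ (acc1 acc2 mn mx : Int), acc2 = acc1 →
      mx = (pvMM arr i s).1 → mn = (pvMM arr i s).2 →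
    (PySem.List.pyRange s N 1).foldl (fun global_max j =>
        let p := (PySem.List.pyRange i (j + 1) 1).foldl
          (fun (p : Int × Int) k =>
            (max p.1 (PySem.List.pyGetD arr k 0), min p.2 (PySem.List.pyGetD arr k 0)))
          ((-2147483648 : Int), (1073741824 : Int))
        if p.1 - p.2 + 1 = j - i + 1 then max global_max (p.1 - p.2 + 1) else global_max) acc1
    = ((PySem.List.pyRange s N 1).foldl (fun (st : Int × Int × Int) j =>
        let mn := min st.2.1 (PySem.List.pyGetD arr j 0)
        let mx := max st.2.2 (PySem.List.pyGetD arr j 0)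
        let best := if mx - mn = j - i then max st.1 (j - i + 1) else st.1
        (best, mn, mx)) (acc2, mn, mx)).1 := by
  intro n
  induction n with
  | zero =>
    intro s hs hn acc1 acc2 mn mx hacc hmx hmn
    rw [PySem.List.pyRange_one_eq_nil (by omega : N ≤ s)]
    simpa using hacc.symm
  | succ n ih =>
    intro s hs hn acc1 acc2 mn mx hacc hmx hmn
    have hsN : s < N := by omega
    have hp : (PySem.List.pyRange i (s + 1) 1).foldl
        (fun (p : Int × Int) k =>
          (max p.1 (PySem.List.pyGetD arr k 0), min p.2 (PySem.List.pyGetD arr k 0)))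
        ((-2147483648 : Int), (1073741824 : Int))
        = (max mx (PySem.List.pyGetD arr s 0), min mn (PySem.List.pyGetD arr s 0)) := by
      have h2 := pvMM_succ arr i s hs
      rw [hmx, hmn]
      exact h2
    rw [PySem.List.pyRange_one_cons hsN]
    simp only [List.foldl_cons]
    refine ih (s + 1) (by omega) (by omega) _ _ _ _ ?h1 ?h2 ?h3
    case h1 =>
      rw [hp, hacc]
      simp only [max_def, min_def]
      split_ifs <;> omega
    case h2 =>
      rw [pvMM_succ arr i s hs, ← hmx]
    case h3 =>
      rw [pvMM_succ arr i s hs, ← hmn]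

theorem largest_subarrys_contiguous_elements_m3_spec : Claim_equal_largest_subarrys_contiguous_elements_m3 := by
  intro arr N _hdom _hpre
  unfold Spec_largest_subarrys_contiguous_elements_m3
  unfold largest_subarrys_contiguous_elements_m3 largest_subarrys_contiguous_elements_m3_alt
  apply PySem.List.foldl_congr_mem
  intro acc i hmem
  rw [PySem.List.mem_pyRange_one] at hmem
  exact pvInnerAux arr N i ((N - i).toNat) i (le_refl i) rfl acc acc 1073741824 (-2147483648)
    rfl (by rw [pvMM_nil]) (by rw [pvMM_nil])
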